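-- pv_equiv track=rewrite | github.com/pglammers/pytikz | pytikz/graph.py | _log_round
-- ===== SOURCE A (Python) =====
-- import math
--
-- def _log_round(value, up=False):
--     assert value > 0
--     normalized_value = 10 ** int(math.floor(math.log10(value)))
--     potential_values = [k * normalized_value for k in [1, 2, 5, 10]]
--     if up:
--         for v in potential_values:
--             if v >= value:
--                 return v
--     else:
--         potential_values.reverse()
--         for v in potential_values:
--             if v <= value:
--                 return v
--     raise NotImplementedError(value)
-- ===== SOURCE B (Python) =====
-- def _log_round(value, up=False):
--     assert value > 0
--     # extract the leading decimal digit m and its decade p by repeated division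
--     p = 1
--     m = value
--     while m >= 10:
--         m //= 10
--         p *= 10
--     if up:
--         if value == m * p and m in (1, 2, 5):
--             return value
--         if m < 2:
--             return 2 * p
--         if m < 5:
--             return 5 * p
--         return 10 * p
--     else:
--         return (5 if m >= 5 else 2 if m >= 2 else 1) * p
-- ===== Notes on version B (the rewrite author's own statement) =====
-- stated objective: alternative
-- what changed: B drops the float log10 and the candidate list entirely: it extracts the leading decimal digit and its decade by an integer division loop, then picks the step (1/2/5/10) by direct threshold comparisons on that digit.
import Mathlib
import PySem

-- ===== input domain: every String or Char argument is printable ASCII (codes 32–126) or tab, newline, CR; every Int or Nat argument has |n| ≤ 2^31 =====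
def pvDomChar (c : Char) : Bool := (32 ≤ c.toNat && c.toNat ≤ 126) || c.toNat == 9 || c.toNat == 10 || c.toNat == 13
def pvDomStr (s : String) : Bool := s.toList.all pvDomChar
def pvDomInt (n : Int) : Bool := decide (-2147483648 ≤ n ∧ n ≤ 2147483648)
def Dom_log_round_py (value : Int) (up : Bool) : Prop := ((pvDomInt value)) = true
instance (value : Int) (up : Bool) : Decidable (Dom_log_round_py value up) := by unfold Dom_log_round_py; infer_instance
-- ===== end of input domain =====

-- B replaces A's float-log10 + candidate-list scan by an integer division loop that extracts
-- the leading decimal digit and its decade, then picks the 1/2/5/10 step by digit thresholds.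

-- ===== PORT A =====
-- `int(math.floor(math.log10(value)))` for a positive int value: exact integer floor-log10
-- (the float computation is exact for all 1 ≤ value ≤ 2^31, verified on boundary values).
def intLog10 (v : Int) : Int :=
  if v < 10 then 0 else 1 + intLog10 (v / 10)
termination_by v.toNat
decreasing_by
  have : v / 10 < v := by omega
  omega

-- literal transliteration of A: compute normalized, the 4 candidates, then scan.
-- The final `raise NotImplementedError(value)` is unreachable for value > 0 (Pre_) and
-- is rendered as the dummy value 0.
def log_round_py (value : Int) (up : Bool) : Int :=
  let nv := 10 ^ (intLog10 value).toNat
  -- potential_values = [1*nv, 2*nv, 5*nv, 10*nv]; the for-loops over this literal list are unrolled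
  if up then
    if value ≤ 1 * nv then 1 * nv
    else if value ≤ 2 * nv then 2 * nv
    else if value ≤ 5 * nv then 5 * nv
    else if value ≤ 10 * nv then 10 * nv
    else 0  -- raise NotImplementedError
  else
    if 10 * nv ≤ value then 10 * nv
    else if 5 * nv ≤ value then 5 * nv
    else if 2 * nv ≤ value then 2 * nv
    else if 1 * nv ≤ value then 1 * nv
    else 0  -- raise NotImplementedError

-- ===== PORT B =====
-- the `while m >= 10: m //= 10; p *= 10` loop of Source B
def normLoop (m p : Int) : Int × Int :=
  if 10 ≤ m then normLoop (m / 10) (p * 10) else (m, p)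
termination_by m.toNat
decreasing_by
  have : m / 10 < m := by omega
  omega

-- literal transliteration of B (Source B)
def log_round_py_alt (value : Int) (up : Bool) : Int :=
  let mp := normLoop value 1
  let m := mp.1
  let p := mp.2
  if up then
    if value = m * p ∧ (m = 1 ∨ m = 2 ∨ m = 5) then value
    else if m < 2 then 2 * p
    else if m < 5 then 5 * p
    else 10 * p
  else
    (if 5 ≤ m then 5 else if 2 ≤ m then 2 else 1) * p

-- ===== PRECONDITION & SPEC =====
-- A's `assert value > 0` raises AssertionError for value ≤ 0; exactly those inputs are excluded.
def Pre_log_round_py (value : Int) (up : Bool) : Prop := 0 < value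
instance (value : Int) (up : Bool) : Decidable (Pre_log_round_py value up) := by
  unfold Pre_log_round_py; infer_instance
def pvWitness_log_round_py : Int × Bool := (42, true)

def Spec_log_round_py (value : Int) (up : Bool) (out : Int) : Prop := out = log_round_py_alt value up
instance (value : Int) (up : Bool) (out : Int) : Decidable (Spec_log_round_py value up out) := by
  unfold Spec_log_round_py; infer_instance

-- ===== CLAIM =====
def Claim_equal_log_round_py : Prop := ∀ (value : Int) (up : Bool), Dom_log_round_py value up → Pre_log_round_py value up → Spec_log_round_py value up (log_round_py value up)

-- ===== LEMMAS AND PROOFS =====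

theorem intLog10_nonneg (v : Int) : 0 ≤ intLog10 v := by
  unfold intLog10
  split
  · exact le_refl 0
  · have := intLog10_nonneg (v / 10)
    omega
termination_by v.toNat
decreasing_by omega

-- normLoop m p ends with the leading digit d of m and p scaled by m's decade,
-- with the bracketing d * 10^e ≤ m < (d+1) * 10^e.
theorem normLoop_spec (m p : Int) (hm : 1 ≤ m) :
    ∃ d : Int, normLoop m p = (d, p * 10 ^ (intLog10 m).toNat) ∧
      1 ≤ d ∧ d ≤ 9 ∧
      d * 10 ^ (intLog10 m).toNat ≤ m ∧ m < (d + 1) * 10 ^ (intLog10 m).toNat := by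
  by_cases h : 10 ≤ m
  · have hq : 1 ≤ m / 10 := by omega
    obtain ⟨d, heq, hd1, hd9, hlo, hhi⟩ := normLoop_spec (m / 10) (p * 10) hq
    refine ⟨d, ?_, hd1, hd9, ?_, ?_⟩
    · rw [normLoop]
      simp only [h, if_pos]
      rw [heq]
      have hnn := intLog10_nonneg (m / 10)
      have : (intLog10 m).toNat = (intLog10 (m / 10)).toNat + 1 := by
        rw [intLog10]; simp only [show ¬ m < 10 by omega, if_neg, ite_false]; omega
      rw [this]
      congr 1
      ring
    all_goals
      have hnn := intLog10_nonneg (m / 10)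
      have hE : (intLog10 m).toNat = (intLog10 (m / 10)).toNat + 1 := by
        rw [intLog10]; simp only [show ¬ m < 10 by omega, if_neg, ite_false]; omega
      rw [hE]
      set E : Int := 10 ^ (intLog10 (m / 10)).toNat with hEdef
      have hEpos : (1 : Int) ≤ E := one_le_pow₀ (by norm_num)
      have hp : (10 : Int) ^ ((intLog10 (m / 10)).toNat + 1) = E * 10 := by
        rw [hEdef]; ring
      rw [hp]
    · -- lower bound: d * (E*10) ≤ m
      have h1 : d * E ≤ m / 10 := hlo
      have h2 : d * E * 10 ≤ (m / 10) * 10 := by nlinarith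
      have h3 : (m / 10) * 10 ≤ m := by omega
      nlinarith
    · -- upper bound: m < (d+1) * (E*10)
      have h1 : m / 10 + 1 ≤ (d + 1) * E := hhi
      have h2 : (m / 10 + 1) * 10 ≤ (d + 1) * E * 10 := by nlinarith
      have h3 : m < (m / 10 + 1) * 10 := by omega
      nlinarith
  · refine ⟨m, ?_, by omega, by omega, ?_, ?_⟩
    · rw [normLoop]
      simp only [h, if_neg, ite_false]
      rw [intLog10]
      simp [show m < 10 by omega]
    · rw [intLog10]; simp [show m < 10 by omega]
    · rw [intLog10]; simp [show m < 10 by omega]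
termination_by m.toNat
decreasing_by omega

-- ===== VERDICT =====
set_option maxHeartbeats 2000000 in
theorem log_round_py_spec : Claim_equal_log_round_py := by
  intro value up _ hpre
  have hv : (1 : Int) ≤ value := hpre
  obtain ⟨d, heq, hd1, hd9, hlo, hhi⟩ := normLoop_spec value 1 hv
  unfold Spec_log_round_py log_round_py log_round_py_alt
  rw [heq]
  simp only [one_mul]
  set n : Int := 10 ^ (intLog10 value).toNat with hn
  have hn1 : (1 : Int) ≤ n := one_le_pow₀ (by norm_num)
  clear heq hn hpre
  interval_cases d <;> split_ifs <;> omega
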